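-- pv_equiv track=rewrite | github.com/KiloMusician/ChatDev2 | ecosystem/Dev-Mentor/app/game_engine/sat_solver.py | _eval_clauses
-- ===== SOURCE A (Python) =====
-- from typing import Any, Dict, List, Optional, Set, Tuple
--
-- def _eval_clauses(clauses: List[List[int]], assignment: Dict[int, bool]) -> bool:
--     """Check if assignment satisfies all clauses."""
--     for clause in clauses:
--         sat = False
--         for lit in clause:
--             var = abs(lit)
--             val = assignment.get(var)
--             if val is None:
--                 continue
--             if (lit > 0 and val) or (lit < 0 and not val):
--                 sat = True
--                 break
--         if not sat:
--             return False
--     return True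
-- ===== SOURCE B (Python) =====
-- from typing import Dict, List
--
-- def _eval_clauses(clauses: List[List[int]], assignment: Dict[int, bool]) -> bool:
--     """Check if assignment satisfies all clauses."""
--     # Inverted index: variable -> occurrences (clause index, polarity).
--     index = {}
--     for i, clause in enumerate(clauses):
--         for lit in clause:
--             index.setdefault(abs(lit), []).append((i, lit > 0))
--     # One pass over the assignment, crossing off every clause it satisfies.
--     unsat = set(range(len(clauses)))
--     for var, val in assignment.items():
--         for i, polarity in index.get(var, ()):
--             if polarity == val:
--                 unsat.discard(i)
--     return not unsat
-- ===== Notes on version B (the rewrite author's own statement) =====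
-- stated objective: alternative
-- what changed: B builds an inverted index from variables to (clause index, polarity) occurrences and then makes one pass over the assignment, crossing satisfied clauses off a pending set, instead of A's per-clause scan that looks each literal up in the assignment; Pre_ excludes the malformed corner where some clause contains literal 0 while variable 0 is assigned False, where 0 and -0 collapse and A's never-satisfied treatment of literal 0 is as accidental as B's.
-- outside the precondition, e.g. on _eval_clauses([[0]], {0: False}): A returns False, B returns True
import Mathlib
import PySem

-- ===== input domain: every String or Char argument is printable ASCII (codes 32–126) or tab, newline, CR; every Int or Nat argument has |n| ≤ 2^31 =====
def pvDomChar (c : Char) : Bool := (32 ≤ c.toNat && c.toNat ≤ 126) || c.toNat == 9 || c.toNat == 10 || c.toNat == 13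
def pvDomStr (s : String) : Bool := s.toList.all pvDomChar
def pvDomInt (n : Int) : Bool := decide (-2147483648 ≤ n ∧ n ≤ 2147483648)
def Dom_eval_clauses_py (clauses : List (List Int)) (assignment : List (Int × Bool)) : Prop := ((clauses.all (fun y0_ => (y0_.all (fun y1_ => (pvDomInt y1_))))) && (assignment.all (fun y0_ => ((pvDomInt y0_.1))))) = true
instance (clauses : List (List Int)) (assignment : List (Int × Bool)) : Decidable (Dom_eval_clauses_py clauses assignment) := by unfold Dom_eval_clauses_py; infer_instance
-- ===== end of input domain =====

-- B replaces A's per-clause literal-lookup scan by an inverted index (variable -> (clause, polarity))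
-- plus one pass over the assignment that crosses satisfied clauses off a pending set; equal return value
-- on Pre_, which only excludes the malformed literal-0 corner.

-- ===== PORT A =====
-- inner 'for lit in clause' loop with its sat flag / break / continue
def pvSatClause (d : PySem.Dict Int Bool) : List Int → Bool
  | [] => false
  | lit :: rest =>
    match d.get? |lit| with
    | none => pvSatClause d rest
    | some val => if (decide (lit > 0) && val) || (decide (lit < 0) && !val) then true else pvSatClause d rest

-- outer 'for clause in clauses' loop with its early 'return False'
def pvAllClauses (d : PySem.Dict Int Bool) : List (List Int) → Bool
  | [] => true
  | c :: cs => if !(pvSatClause d c) then false else pvAllClauses d cs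

def eval_clauses_py (clauses : List (List Int)) (assignment : List (Int × Bool)) : Bool :=
  pvAllClauses (PySem.Dict.ofList assignment) clauses

-- ===== PORT B =====
-- 'for i, clause in enumerate(clauses): for lit in clause: index.setdefault(abs(lit), []).append((i, lit > 0))'
def pvIndex (clauses : List (List Int)) : PySem.Dict Int (List (Int × Bool)) :=
  (PySem.List.enumerate clauses).foldl
    (fun d ic => ic.2.foldl (fun d lit => d.modify |lit| [] (· ++ [(ic.1, decide (lit > 0))])) d)
    PySem.Dict.empty

-- 'for var, val in assignment.items(): for i, polarity in index.get(var, ()): if polarity == val: unsat.discard(i)'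
def pvCrossOff (index : PySem.Dict Int (List (Int × Bool))) (items : List (Int × Bool))
    (unsat : PySem.Set Int) : PySem.Set Int :=
  items.foldl
    (fun s p => (index.getD p.1 []).foldl
      (fun s e => if e.2 == p.2 then PySem.Set.discard s e.1 else s) s)
    unsat

def eval_clauses_py_alt (clauses : List (List Int)) (assignment : List (Int × Bool)) : Bool :=
  let index := pvIndex clauses
  let unsat := pvCrossOff index (PySem.Dict.ofList assignment).items
    (PySem.Set.ofList (PySem.List.pyRange 0 clauses.length 1))
  unsat.isEmpty

-- ===== PRECONDITION & SPEC =====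
-- Pre_ excludes only the malformed corner where some clause contains literal 0 while variable 0 is
-- assigned False: there 0 and -0 collapse, A's abs-based scan can never satisfy literal 0 while B's
-- variable-indexed view does, and neither value is specified for a non-literal.
def Pre_eval_clauses_py (clauses : List (List Int)) (assignment : List (Int × Bool)) : Prop :=
  ¬ ((∃ c ∈ clauses, (0 : Int) ∈ c) ∧ (PySem.Dict.ofList assignment).get? 0 = some false)
instance (clauses : List (List Int)) (assignment : List (Int × Bool)) : Decidable (Pre_eval_clauses_py clauses assignment) := by unfold Pre_eval_clauses_py; infer_instance

def pvWitness_eval_clauses_py : List (List Int) × (List (Int × Bool)) := ([[1, -2], [-1]], [(1, false), (2, false)])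

def Spec_eval_clauses_py (clauses : List (List Int)) (assignment : List (Int × Bool)) (out : Bool) : Prop := out = eval_clauses_py_alt clauses assignment
instance (clauses : List (List Int)) (assignment : List (Int × Bool)) (out : Bool) : Decidable (Spec_eval_clauses_py clauses assignment out) := by unfold Spec_eval_clauses_py; infer_instance

-- ===== CLAIM (what is proved, stated in full; the proofs are below) =====
def Claim_equal_eval_clauses_py : Prop := ∀ (clauses : List (List Int)) (assignment : List (Int × Bool)), Dom_eval_clauses_py clauses assignment → Pre_eval_clauses_py clauses assignment → Spec_eval_clauses_py clauses assignment (eval_clauses_py clauses assignment)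

-- ===== LEMMAS AND PROOFS =====

-- A-side: when the inner scan reports a clause satisfied
lemma pvSatClause_eq_true_iff (d : PySem.Dict Int Bool) (c : List Int) :
    pvSatClause d c = true ↔
      ∃ lit ∈ c, ((0 < lit ∧ d.get? lit = some true) ∨ (lit < 0 ∧ d.get? (-lit) = some false)) := by
  induction c with
  | nil => simp [pvSatClause]
  | cons lit rest ih =>
    simp only [List.mem_cons, exists_eq_or_imp, ← ih]
    show (match d.get? |lit| with
      | none => pvSatClause d rest
      | some val => if (decide (lit > 0) && val) || (decide (lit < 0) && !val) then true else pvSatClause d rest) = true ↔ _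
    rcases lt_trichotomy lit 0 with hl | hl | hl
    · rw [abs_of_neg hl]
      cases hget : d.get? (-lit) with
      | none => simp [hl, not_lt.mpr hl.le]
      | some val => cases val <;> simp [hl, not_lt.mpr hl.le]
    · subst hl
      cases hget : d.get? |(0:Int)| <;> simp_all
    · rw [abs_of_pos hl]
      cases hget : d.get? lit with
      | none => simp [hl, not_lt.mpr hl.le]
      | some val => cases val <;> simp [hl, not_lt.mpr hl.le]

lemma pvAllClauses_eq_true_iff (d : PySem.Dict Int Bool) (cs : List (List Int)) :
    pvAllClauses d cs = true ↔ ∀ c ∈ cs, pvSatClause d c = true := by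
  induction cs with
  | nil => simp [pvAllClauses]
  | cons c cs ih =>
    simp only [pvAllClauses]
    cases h : pvSatClause d c <;> simp [h, ih]

-- B-side: the index build as a flat fold over all (variable, occurrence) entries
def pvEntries (clauses : List (List Int)) : List (Int × (Int × Bool)) :=
  (PySem.List.enumerate clauses).flatMap (fun ic => ic.2.map (fun lit => (|lit|, (ic.1, decide (lit > 0)))))

lemma pvIndex_eq (clauses : List (List Int)) :
    pvIndex clauses = (pvEntries clauses).foldl (fun d p => d.modify p.1 [] (· ++ [p.2])) PySem.Dict.empty := by
  unfold pvIndex pvEntries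
  rw [List.foldl_flatMap]
  simp [List.foldl_map]

-- occurrences stored in the index
lemma mem_getD_pvIndex (clauses : List (List Int)) (v : Int) (e : Int × Bool) :
    e ∈ (pvIndex clauses).getD v [] ↔
      ∃ (k : Nat) (h : k < clauses.length), ∃ lit ∈ clauses[k], |lit| = v ∧ e = ((k : Int), decide (0 < lit)) := by
  rw [pvIndex_eq, PySem.Dict.getD_foldl_modify_append, PySem.Dict.getD_empty]
  simp only [List.nil_append, List.mem_map, List.mem_filter, pvEntries, List.mem_flatMap,
    PySem.List.mem_enumerate_iff, zero_add, beq_iff_eq]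
  constructor
  · rintro ⟨p, ⟨⟨ic, ⟨⟨k, hk, rfl⟩, lit, hlit, rfl⟩⟩, hv⟩, rfl⟩
    exact ⟨k, hk, lit, hlit, by simpa using hv, by simp⟩
  · rintro ⟨k, hk, lit, hlit, hv, rfl⟩
    exact ⟨(|lit|, ((k : Int), decide (0 < lit))), ⟨⟨((k : Int), clauses[k]), ⟨k, hk, by simp⟩,
      lit, hlit, by simp⟩, hv⟩, rfl⟩

-- the conditional-discard loop over one occurrence list
lemma mem_foldl_discard_if (L : List (Int × Bool)) (val : Bool) (s : PySem.Set Int) (x : Int) :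
    x ∈ L.foldl (fun s e => if e.2 == val then PySem.Set.discard s e.1 else s) s ↔
      x ∈ s ∧ ¬ ∃ e ∈ L, e.2 = val ∧ e.1 = x := by
  induction L generalizing s with
  | nil => simp
  | cons e L ih =>
    rw [List.foldl_cons, ih]
    by_cases he : e.2 = val
    · rw [if_pos (by simpa using he), PySem.Set.mem_discard]
      constructor
      · rintro ⟨⟨hx, hne⟩, h2⟩
        refine ⟨hx, ?_⟩
        rintro ⟨a, ha, h3, h4⟩
        rcases List.mem_cons.mp ha with rfl | ha'
        · exact hne h4.symm
        · exact h2 ⟨a, ha', h3, h4⟩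
      · rintro ⟨hx, h⟩
        refine ⟨⟨hx, fun hh => h ⟨e, List.mem_cons_self, he, hh.symm⟩⟩,
          fun ⟨a, ha, h3, h4⟩ => h ⟨a, List.mem_cons_of_mem _ ha, h3, h4⟩⟩
    · rw [if_neg (by simpa using he)]
      constructor
      · rintro ⟨hx, h2⟩
        refine ⟨hx, ?_⟩
        rintro ⟨a, ha, h3, h4⟩
        rcases List.mem_cons.mp ha with rfl | ha'
        · exact he h3
        · exact h2 ⟨a, ha', h3, h4⟩
      · rintro ⟨hx, h⟩
        exact ⟨hx, fun ⟨a, ha, h3, h4⟩ => h ⟨a, List.mem_cons_of_mem _ ha, h3, h4⟩⟩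

-- membership in the final pending set after the whole assignment pass
lemma mem_pvCrossOff (index : PySem.Dict Int (List (Int × Bool))) (items : List (Int × Bool))
    (s : PySem.Set Int) (x : Int) :
    x ∈ pvCrossOff index items s ↔
      x ∈ s ∧ ¬ ∃ p ∈ items, ∃ e ∈ index.getD p.1 [], e.2 = p.2 ∧ e.1 = x := by
  induction items generalizing s with
  | nil => simp [pvCrossOff]
  | cons p items ih =>
    simp only [pvCrossOff, List.foldl_cons] at *
    rw [ih, mem_foldl_discard_if]
    constructor
    · rintro ⟨⟨hx, h1⟩, h2⟩
      refine ⟨hx, ?_⟩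
      rintro ⟨q, hq, e, he, h3, h4⟩
      rcases List.mem_cons.mp hq with rfl | hq'
      · exact h1 ⟨e, he, h3, h4⟩
      · exact h2 ⟨q, hq', e, he, h3, h4⟩
    · rintro ⟨hx, h⟩
      exact ⟨⟨hx, fun ⟨e, he, h3, h4⟩ => h ⟨p, List.mem_cons_self, e, he, h3, h4⟩⟩,
        fun ⟨q, hq, e, he, h3, h4⟩ => h ⟨q, List.mem_cons_of_mem _ hq, e, he, h3, h4⟩⟩

-- bridge: clause k is crossed off by B's pass iff A's scan reports it satisfied (uses Pre_)
lemma crossed_iff_sat (clauses : List (List Int)) (assignment : List (Int × Bool))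
    (hpre : Pre_eval_clauses_py clauses assignment) (k : Nat) (hk : k < clauses.length) :
    (∃ p ∈ (PySem.Dict.ofList assignment).items,
        ∃ e ∈ (pvIndex clauses).getD p.1 [], e.2 = p.2 ∧ e.1 = (k : Int)) ↔
      pvSatClause (PySem.Dict.ofList assignment) clauses[k] = true := by
  have hnd := PySem.Dict.nodup_keys_ofList assignment
  rw [pvSatClause_eq_true_iff]
  constructor
  · rintro ⟨p, hp, e, he, h2, h1⟩
    obtain ⟨k', hk', lit, hlit, habs, rfl⟩ := (mem_getD_pvIndex clauses p.1 e).mp he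
    have hkk : k' = k := by
      have : (k' : Int) = (k : Int) := h1
      exact_mod_cast this
    subst hkk
    have hget : (PySem.Dict.ofList assignment).get? p.1 = some p.2 :=
      PySem.Dict.get?_of_mem_items _ hp hnd
    rcases lt_trichotomy lit 0 with hl | hl | hl
    · refine ⟨lit, hlit, Or.inr ⟨hl, ?_⟩⟩
      rw [← abs_of_neg hl, habs, hget, ← h2]
      simp [not_lt.mpr hl.le]
    · subst hl
      exfalso
      apply hpre
      refine ⟨⟨clauses[k'], List.getElem_mem hk', hlit⟩, ?_⟩
      rw [show (0 : Int) = p.1 by simpa using habs, hget, ← h2]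
      simp
    · refine ⟨lit, hlit, Or.inl ⟨hl, ?_⟩⟩
      rw [← abs_of_pos hl, habs, hget, ← h2]
      simp [hl]
  · rintro ⟨lit, hlit, hcase⟩
    rcases hcase with ⟨hpos, hget⟩ | ⟨hneg, hget⟩
    · exact ⟨(lit, true), PySem.Dict.mem_items_of_get?_eq_some _ hget,
        ((k : Int), true),
        (mem_getD_pvIndex clauses lit _).mpr ⟨k, hk, lit, hlit, abs_of_pos hpos, by simp [hpos]⟩,
        rfl, rfl⟩
    · exact ⟨(-lit, false), PySem.Dict.mem_items_of_get?_eq_some _ hget,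
        ((k : Int), false),
        (mem_getD_pvIndex clauses (-lit) _).mpr
          ⟨k, hk, lit, hlit, abs_of_neg hneg, by simp [not_lt.mpr hneg.le]⟩,
        rfl, rfl⟩

-- ===== VERDICT (by name: the statement is the Claim_ definition above) =====
theorem eval_clauses_py_spec : Claim_equal_eval_clauses_py := by
  intro clauses assignment _ hpre
  unfold Spec_eval_clauses_py eval_clauses_py eval_clauses_py_alt
  rw [Bool.eq_iff_iff, pvAllClauses_eq_true_iff]
  simp only [List.isEmpty_iff, List.eq_nil_iff_forall_not_mem]
  constructor
  · intro hall x hx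
    rw [mem_pvCrossOff] at hx
    obtain ⟨hx0, hnr⟩ := hx
    rw [PySem.Set.mem_ofList, PySem.List.mem_pyRange_one] at hx0
    obtain ⟨h0, hlt⟩ := hx0
    have hk : x.toNat < clauses.length := by omega
    apply hnr
    have := (crossed_iff_sat clauses assignment hpre x.toNat hk).mpr
      (hall _ (List.getElem_mem hk))
    simpa [Int.toNat_of_nonneg h0] using this
  · intro hempty c hc
    obtain ⟨k, hk, rfl⟩ := List.mem_iff_getElem.mp hc
    refine (crossed_iff_sat clauses assignment hpre k hk).mp ?_
    by_contra hnr
    refine hempty (k : Int) ?_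
    rw [mem_pvCrossOff]
    refine ⟨?_, hnr⟩
    rw [PySem.Set.mem_ofList, PySem.List.mem_pyRange_one]
    constructor
    · exact Int.natCast_nonneg k
    · exact_mod_cast hk
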